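-- pv_equiv track=rewrite | github.com/stevenwtolbert/erdos-710-analysis | experiments/graph_theoretic/hpc_z41_descent_chains.py | compute_private_counts
-- ===== SOURCE A (Python) =====
-- from collections import Counter, defaultdict
--
-- def compute_private_counts(T, targets):
--     """
--     Efficiently compute private target count for each k in T.
--     A target h is private to k if mu_T(h) == 1, where mu_T(h) = |{k' in T : h in targets(k')}|.
--     Returns list of (k, private_count).
--     """
--     T_set = set(T)
--     # Count mu_T(h) for each target h
--     mu_T = Counter()
--     for k in T:
--         for h in targets.get(k, set()):
--             mu_T[h] += 1
--
--     # For each k, count targets with mu_T(h) == 1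
--     result = []
--     for k in T:
--         private = sum(1 for h in targets.get(k, set()) if mu_T[h] == 1)
--         result.append((k, private))
--     return result
-- ===== SOURCE B (Python) =====
-- from collections import Counter, defaultdict
--
-- def compute_private_counts(T, targets):
--     mu = Counter()
--     owner = {}
--     for k in T:
--         for h in targets.get(k, ()):
--             mu[h] += 1
--             owner[h] = k
--     counts = defaultdict(int)
--     for h, c in mu.items():
--         if c == 1:
--             counts[owner[h]] += 1
--     return [(k, counts[k]) for k in T]
-- ===== Notes on version B (the rewrite author's own statement) =====
-- stated objective: alternative
-- what changed: The second pass that re-scans every key's whole target list against the multiplicity table is replaced by a single crediting pass over the multiplicity table itself (using an owner map recorded during counting), after which each key's private count is a plain table lookup.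
import Mathlib
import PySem

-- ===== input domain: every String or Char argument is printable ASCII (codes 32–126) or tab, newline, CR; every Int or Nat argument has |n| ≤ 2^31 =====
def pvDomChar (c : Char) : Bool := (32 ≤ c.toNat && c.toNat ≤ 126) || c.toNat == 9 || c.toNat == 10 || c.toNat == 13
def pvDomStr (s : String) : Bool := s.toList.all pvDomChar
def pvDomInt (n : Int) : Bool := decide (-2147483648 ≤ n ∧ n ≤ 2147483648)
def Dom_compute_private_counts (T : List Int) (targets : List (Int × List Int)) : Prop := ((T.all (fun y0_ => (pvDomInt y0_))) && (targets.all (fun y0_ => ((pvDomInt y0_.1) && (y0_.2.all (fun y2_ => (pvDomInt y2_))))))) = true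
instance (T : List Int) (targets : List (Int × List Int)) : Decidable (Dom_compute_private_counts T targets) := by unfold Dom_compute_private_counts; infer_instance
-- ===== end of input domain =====

-- B replaces A's second pass (which re-scans every key's whole target list against the
-- multiplicity table) by a single crediting pass over the multiplicity table keyed by the
-- recorded owner of each target, then reads the per-key result off a counts table (objective: alternative decomposition).

-- ===== PORT A =====
def compute_private_counts (T : List Int) (targets : List (Int × List Int)) : List (Int × Int) :=
  let _T_set : PySem.Set Int := PySem.Set.ofList T   -- A computes T_set = set(T) and never uses it
  let tdict : PySem.Dict Int (List Int) := PySem.Dict.mk targets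
  let mu : PySem.Dict Int Int :=
    T.foldl (fun mu k => (tdict.getD k []).foldl (fun mu h => mu.modify h 0 (· + 1)) mu)
      PySem.Dict.empty
  T.foldl (fun result k =>
      result ++ [(k, (tdict.getD k []).foldl
        (fun acc h => if mu.getD h 0 = 1 then acc + 1 else acc) (0 : Int))])
    []

-- ===== PORT B =====
def compute_private_counts_alt (T : List Int) (targets : List (Int × List Int)) : List (Int × Int) :=
  let tdict : PySem.Dict Int (List Int) := PySem.Dict.mk targets
  let st :=
    T.foldl (fun st k => (tdict.getD k []).foldl
        (fun st h => (st.1.modify h 0 (· + 1), st.2.insert h k)) st)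
      ((PySem.Dict.empty : PySem.Dict Int Int), (PySem.Dict.empty : PySem.Dict Int Int))
  -- owner[h] in Source B never raises: every key of mu is a key of owner, so getD is exact here
  let counts : PySem.Dict Int Int :=
    st.1.items.foldl
      (fun counts p => if p.2 = 1 then counts.modify (st.2.getD p.1 0) 0 (· + 1) else counts)
      PySem.Dict.empty
  T.map (fun k => (k, counts.getD k 0))

-- ===== PRECONDITION & SPEC =====
def Spec_compute_private_counts (T : List Int) (targets : List (Int × List Int)) (out : List (Int × Int)) : Prop := out = compute_private_counts_alt T targets
instance (T : List Int) (targets : List (Int × List Int)) (out : List (Int × Int)) : Decidable (Spec_compute_private_counts T targets out) := by unfold Spec_compute_private_counts; infer_instance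

-- ===== CLAIM (what is proved, stated in full; the proofs are below) =====
def Claim_equal_compute_private_counts : Prop := ∀ (T : List Int) (targets : List (Int × List Int)), Dom_compute_private_counts T targets → Spec_compute_private_counts T targets (compute_private_counts T targets)

-- ===== LEMMAS AND PROOFS =====

-- the list of (target, key) pairs in the order B's first loop visits them
def pvPairs (L : Int → List Int) (T : List Int) : List (Int × Int) :=
  T.flatMap (fun k => (L k).map (fun h => (h, k)))

-- the owner dict B's first loop builds (last writer wins)
def pvOwner (L : Int → List Int) (T : List Int) : PySem.Dict Int Int :=
  (pvPairs L T).foldl (fun o p => o.insert p.1 p.2) PySem.Dict.empty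

lemma pv_foldl_insert_get? (P : List (Int × Int)) (o : PySem.Dict Int Int) (h : Int) :
    (P.foldl (fun o p => o.insert p.1 p.2) o).get? h =
      match P.reverse.find? (fun p => p.1 == h) with
      | some p => some p.2
      | none => o.get? h := by
  induction P generalizing o with
  | nil => simp
  | cons p P ih =>
      simp only [List.foldl_cons, ih, List.reverse_cons, List.find?_append]
      cases hf : P.reverse.find? (fun p => p.1 == h) with
      | some q => simp [Option.or]
      | none =>
          simp only [Option.or, List.find?]
          by_cases hph : p.1 = h
          · simp [hph]
          · have : (p.1 == h) = false := by simp [hph]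
            simp [this, PySem.Dict.get?_insert, Ne.symm hph]

lemma pv_countP_pairs (L : Int → List Int) (T : List Int) (h : Int) :
    (pvPairs L T).countP (fun p => p.1 == h) = (T.flatMap L).count h := by
  induction T with
  | nil => simp [pvPairs]
  | cons k T ih =>
      simp only [pvPairs, List.flatMap_cons, List.countP_append, List.count_append] at *
      rw [ih, List.countP_map, List.count_eq_countP]
      rfl

lemma pv_mem_pairs (L : Int → List Int) (T : List Int) (h k : Int) :
    (h, k) ∈ pvPairs L T ↔ k ∈ T ∧ h ∈ L k := by
  simp only [pvPairs, List.mem_flatMap, List.mem_map]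
  constructor
  · rintro ⟨k', hk', h', hh', heq⟩
    obtain ⟨rfl, rfl⟩ : h' = h ∧ k' = k := by
      constructor <;> [exact congrArg Prod.fst heq; exact congrArg Prod.snd heq]
    exact ⟨hk', hh'⟩
  · rintro ⟨hk, hh⟩; exact ⟨k, hk, h, hh, rfl⟩

lemma pv_owner_mem (L : Int → List Int) (T : List Int) (h : Int)
    (hm : h ∈ T.flatMap L) :
    ∃ k', (pvOwner L T).get? h = some k' ∧ k' ∈ T ∧ h ∈ L k' := by
  obtain ⟨k₀, hk₀, hh₀⟩ := List.mem_flatMap.1 hm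
  have hmem : (h, k₀) ∈ (pvPairs L T).reverse := by
    rw [List.mem_reverse]; exact (pv_mem_pairs L T h k₀).2 ⟨hk₀, hh₀⟩
  have hsome : ((pvPairs L T).reverse.find? (fun p => p.1 == h)).isSome := by
    rw [List.find?_isSome]; exact ⟨(h, k₀), hmem, by simp⟩
  obtain ⟨q, hq⟩ := Option.isSome_iff_exists.1 hsome
  have hqmem : q ∈ pvPairs L T := List.mem_reverse.1 (List.mem_of_find?_eq_some hq)
  have hq1 : q.1 = h := by simpa using List.find?_some hq
  have hq' : (q.1, q.2) ∈ pvPairs L T := by simpa using hqmem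
  rw [hq1] at hq'
  obtain ⟨hkq, hhq⟩ := (pv_mem_pairs L T h q.2).1 hq'
  refine ⟨q.2, ?_, hkq, hhq⟩
  rw [pvOwner, pv_foldl_insert_get?, hq]

lemma pv_owner_unique (L : Int → List Int) (T : List Int) (h k : Int)
    (hk : k ∈ T) (hh : h ∈ L k) (hc : (T.flatMap L).count h = 1) :
    (pvOwner L T).get? h = some k := by
  have hcp : (pvPairs L T).countP (fun p => p.1 == h) = 1 := by
    rw [pv_countP_pairs]; exact hc
  have hlen : ((pvPairs L T).filter (fun p => p.1 == h)).length = 1 := by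
    rw [← List.countP_eq_length_filter]; exact hcp
  obtain ⟨a, ha⟩ := List.length_eq_one_iff.1 hlen
  obtain ⟨k', hget, hk', hh'⟩ := pv_owner_mem L T h (List.mem_flatMap.2 ⟨k, hk, hh⟩)
  -- both (h, k) and (h, k') are in the filter-singleton, hence equal
  have hmk : (h, k) ∈ (pvPairs L T).filter (fun p => p.1 == h) := by
    rw [List.mem_filter]
    exact ⟨(pv_mem_pairs L T h k).2 ⟨hk, hh⟩, by simp⟩
  have hmk' : (h, k') ∈ (pvPairs L T).filter (fun p => p.1 == h) := by
    rw [List.mem_filter]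
    exact ⟨(pv_mem_pairs L T h k').2 ⟨hk', hh'⟩, by simp⟩
  rw [ha, List.mem_singleton] at hmk hmk'
  rw [hget]
  have : k = k' := by
    have := hmk.trans hmk'.symm
    exact congrArg Prod.snd this
  rw [this]

lemma pv_count_le_flatMap (L : Int → List Int) (T : List Int) (h k : Int) (hk : k ∈ T) :
    (L k).count h ≤ (T.flatMap L).count h := by
  induction T with
  | nil => cases hk
  | cons a T ih =>
      rw [List.flatMap_cons, List.count_append]
      rcases List.mem_cons.1 hk with rfl | hk'
      · omega
      · have := ih hk'; omega

-- the crediting pass and A's per-key re-scan count the same targets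
lemma pv_main (L : Int → List Int) (T : List Int) (k : Int) (hk : k ∈ T) :
    List.count k
      (((PySem.Set.ofList (T.flatMap L)).filter
          (fun h => decide (((T.flatMap L).count h : Int) = 1))).map
        (fun h => (pvOwner L T).getD h 0))
    = (L k).countP (fun h => decide (((T.flatMap L).count h : Int) = 1)) := by
  set flat := T.flatMap L with hflat
  set pred : Int → Bool := fun h => decide ((flat.count h : Int) = 1) with hpred
  have hpred1 : ∀ h, pred h = true → flat.count h = 1 := by
    intro h hp
    have : ((flat.count h : Int) = 1) := by simpa [hpred] using hp
    exact_mod_cast this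
  rw [List.count_eq_countP, List.countP_map, List.countP_filter]
  -- LHS is now a countP over the distinct elements of flat
  set q : Int → Bool := fun h => ((fun x => x == k) ∘ fun h => (pvOwner L T).getD h 0) h && pred h with hq
  have hnd1 : ((PySem.Set.ofList flat).filter q).Nodup :=
    (PySem.Set.nodup_ofList flat).filter q
  have hnd2 : ((L k).filter pred).Nodup := by
    rw [List.nodup_iff_count_le_one]
    intro a
    by_cases hp : pred a = true
    · rw [List.count_filter hp]
      calc (L k).count a ≤ flat.count a := pv_count_le_flatMap L T a k hk
        _ = 1 := hpred1 a hp
    · have : a ∉ (L k).filter pred := by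
        intro hmem; exact hp (List.mem_filter.1 hmem).2
      rw [List.count_eq_zero.2 this]; omega
  have hmem : ∀ a, a ∈ (PySem.Set.ofList flat).filter q ↔ a ∈ (L k).filter pred := by
    intro a
    simp only [List.mem_filter, PySem.Set.mem_ofList, hq, Function.comp]
    constructor
    · rintro ⟨hmf, hand⟩
      obtain ⟨hop, hp⟩ := Bool.and_eq_true_iff.1 hand
      obtain ⟨k', hget, hk', hh'⟩ := pv_owner_mem L T a hmf
      have hgd : (pvOwner L T).getD a 0 = k' := by
        rw [PySem.Dict.getD_eq_get?_getD, hget]; rfl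
      have hkk : k' = k := by
        have := (beq_iff_eq).1 hop; rw [hgd] at this; exact this
      exact ⟨hkk ▸ hh', hp⟩
    · rintro ⟨hmem, hp⟩
      have hmf : a ∈ flat := List.mem_flatMap.2 ⟨k, hk, hmem⟩
      refine ⟨hmf, ?_⟩
      have hget := pv_owner_unique L T a k hk hmem (hpred1 a hp)
      have hgd : (pvOwner L T).getD a 0 = k := by
        rw [PySem.Dict.getD_eq_get?_getD, hget]; rfl
      simp [hgd, hp]
  have hfs : ((PySem.Set.ofList flat).filter q).toFinset = ((L k).filter pred).toFinset := by
    apply Finset.ext; intro a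
    rw [List.mem_toFinset, List.mem_toFinset]; exact hmem a
  have hlen : ((PySem.Set.ofList flat).filter q).length = ((L k).filter pred).length := by
    rw [← List.toFinset_card_of_nodup hnd1, ← List.toFinset_card_of_nodup hnd2, hfs]
  rw [List.countP_eq_length_filter, List.countP_eq_length_filter]
  exact hlen

-- B's combined first loop is the mu-counter together with the owner dict
lemma pv_pairfold (L : Int → List Int) (T : List Int)
    (a b : PySem.Dict Int Int) :
    T.foldl (fun st k => (L k).foldl
        (fun st h => (st.1.modify h 0 (· + 1), st.2.insert h k)) st) (a, b)
    = (T.foldl (fun mu k => (L k).foldl (fun mu h => mu.modify h 0 (· + 1)) mu) a,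
       T.foldl (fun o k => (L k).foldl (fun o h => o.insert h k) o) b) := by
  induction T generalizing a b with
  | nil => rfl
  | cons k T ih =>
      simp only [List.foldl_cons]
      rw [PySem.List.foldl_prod_mk
            (f := fun (m : PySem.Dict Int Int) (h : Int) => m.modify h 0 (· + 1))
            (g := fun (o : PySem.Dict Int Int) (h : Int) => o.insert h k)]
      exact ih _ _

lemma pv_fold_modify_map {α : Type} (P : List α) (f : α → Int) :
    P.foldl (fun (c : PySem.Dict Int Int) p => c.modify (f p) 0 (· + 1)) PySem.Dict.empty
    = PySem.Dict.counter (P.map f) := by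
  rw [PySem.Dict.counter_eq_foldl, List.foldl_map]

lemma pv_mu_eq (L : Int → List Int) (T : List Int) :
    T.foldl (fun mu k => (L k).foldl (fun mu h => mu.modify h 0 (· + 1)) mu) PySem.Dict.empty
    = PySem.Dict.counter (T.flatMap L) := by
  rw [PySem.Dict.counter_eq_foldl, List.foldl_flatMap]

lemma pv_owner_eq (L : Int → List Int) (T : List Int) :
    T.foldl (fun o k => (L k).foldl (fun o h => o.insert h k) o) PySem.Dict.empty
    = pvOwner L T := by
  rw [pvOwner, pvPairs]
  rw [List.foldl_flatMap]
  apply PySem.List.foldl_congr_mem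
  intro acc k _
  rw [List.foldl_map]

-- ===== VERDICT (by name: the statement is the Claim_ definition above) =====
theorem compute_private_counts_spec : Claim_equal_compute_private_counts := by
  intro T targets _
  unfold Spec_compute_private_counts compute_private_counts compute_private_counts_alt
  dsimp only
  set L : Int → List Int := fun k => (PySem.Dict.mk targets).getD k [] with hL
  set flat := T.flatMap L with hflat
  -- A side
  rw [pv_mu_eq L T, PySem.List.foldl_append_singleton_eq_map, List.nil_append]
  -- B side
  rw [pv_pairfold L T, pv_owner_eq L T, pv_mu_eq L T]
  dsimp only
  rw [PySem.List.foldl_ite_eq_foldl_filter (p := fun p : Int × Int => p.2 = 1)]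
  rw [pv_fold_modify_map (f := fun p : Int × Int => (pvOwner L T).getD p.1 0)]
  apply List.map_congr_left
  intro k hk
  have hcredits :
      ((PySem.Dict.counter flat).items.filter (fun p => decide (p.2 = 1))).map
          (fun p : Int × Int => (pvOwner L T).getD p.1 0)
      = ((PySem.Set.ofList flat).filter
            (fun h => decide ((flat.count h : Int) = 1))).map
          (fun h => (pvOwner L T).getD h 0) := by
    rw [PySem.Dict.items_counter, List.filter_map, List.map_map]
    rfl
  rw [hcredits, PySem.Dict.getD_counter, pv_main L T k hk]

  rw [PySem.List.foldl_ite_add_one (p := fun h => ((PySem.Dict.counter flat).getD h 0 = 1))]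
  have hcond : (fun h => decide ((PySem.Dict.counter flat).getD h 0 = 1))
      = (fun h => decide ((flat.count h : Int) = 1)) := by
    funext h; rw [PySem.Dict.getD_counter]
  rw [hcond, zero_add]
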